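-- pv_equiv track=rewrite | github.com/denis-svg/customer-api | azure/urls.py | uniqueClicks
-- ===== SOURCE A (Python) =====
-- def uniqueClicks(person_id_dict):
--     urls = {}
--     for person_id in person_id_dict.keys():
--         already_accesed = {}
--         for event in person_id_dict[person_id]:
--             url = event[0]
--             if url not in already_accesed:
--                 if url not in urls:
--                     urls[url] = 1
--                 else:
--                     urls[url] += 1
--             already_accesed[url] = True
--
--     return urls
-- ===== SOURCE B (Python) =====
-- def uniqueClicks(person_id_dict):
--     urls_seen = {}
--     for person_id, events in person_id_dict.items():
--         for event in events:
--             urls_seen.setdefault(event[0], set()).add(person_id)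
--     return {url: len(persons) for url, persons in urls_seen.items()}
-- ===== Notes on version B (the rewrite author's own statement) =====
-- stated objective: simpler
-- what changed: B maintains an inverted index mapping each url to the set of person_ids that clicked it (one setdefault/add per event, no per-person dedup dict and no incremental counters) and computes all counts in one final comprehension; Pre_ excludes association lists with duplicate person_id keys, which do not correspond to any Python dict input.
import Mathlib
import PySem

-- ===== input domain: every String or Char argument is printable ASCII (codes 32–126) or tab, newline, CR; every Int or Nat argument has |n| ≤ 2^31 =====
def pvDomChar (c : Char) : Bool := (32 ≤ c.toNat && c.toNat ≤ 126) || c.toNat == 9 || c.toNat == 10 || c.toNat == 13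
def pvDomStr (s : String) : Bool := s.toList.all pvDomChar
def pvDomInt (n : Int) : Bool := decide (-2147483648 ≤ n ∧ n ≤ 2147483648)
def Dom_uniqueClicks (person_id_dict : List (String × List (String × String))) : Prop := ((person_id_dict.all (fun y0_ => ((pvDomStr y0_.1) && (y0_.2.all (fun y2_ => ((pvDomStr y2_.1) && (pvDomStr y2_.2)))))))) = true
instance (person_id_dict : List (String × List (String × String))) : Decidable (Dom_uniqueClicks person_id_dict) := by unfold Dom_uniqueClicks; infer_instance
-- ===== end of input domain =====

-- B replaces A's per-person dedup dict with incremental counters by an inverted index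
-- url -> set of person_ids, counted once at the end (objective: simpler).

-- ===== PORT A =====
-- inner-loop body of A: state = (already_accesed, urls); branches in A's order
def pvStepA (st : PySem.Dict String Bool × PySem.Dict String Int) (event : String × String) :
    PySem.Dict String Bool × PySem.Dict String Int :=
  let url := event.1
  let urls :=
    if st.1.contains url = false then
      if st.2.contains url = false then st.2.insert url 1
      else st.2.modify url 0 (· + 1)          -- urls[url] += 1
    else st.2
  (st.1.insert url true, urls)

-- 'for person_id in person_id_dict.keys(): … person_id_dict[person_id]' iterates the
-- key/value pairs in order (exact under Pre_, which demands distinct keys)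
def uniqueClicks (person_id_dict : List (String × List (String × String))) : List (String × Int) :=
  (person_id_dict.foldl
    (fun urls pe => (pe.2.foldl pvStepA (PySem.Dict.empty, urls)).2)
    PySem.Dict.empty).items

-- ===== PORT B =====
-- urls_seen.setdefault(event[0], set()).add(person_id)
def pvStepB (person_id : String) (seen : PySem.Dict String (PySem.Set String))
    (event : String × String) : PySem.Dict String (PySem.Set String) :=
  seen.insert event.1 (PySem.Set.add (seen.getD event.1 PySem.Set.empty) person_id)

def pvLenKV (kv : String × PySem.Set String) : String × Int := (kv.1, PySem.Set.len kv.2)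

def uniqueClicks_alt (person_id_dict : List (String × List (String × String))) : List (String × Int) :=
  ((person_id_dict.foldl
      (fun seen pe => pe.2.foldl (pvStepB pe.1) seen)
      PySem.Dict.empty).items).map pvLenKV

-- ===== PRECONDITION & SPEC =====
-- Pre_ excludes association lists with duplicate person_id keys: they do not correspond
-- to any Python dict input (a dict cannot hold two equal keys), so A's behaviour there
-- is not defined by the source.
def Pre_uniqueClicks (person_id_dict : List (String × List (String × String))) : Prop :=
  (person_id_dict.map Prod.fst).Nodup
instance (person_id_dict : List (String × List (String × String))) : Decidable (Pre_uniqueClicks person_id_dict) := by unfold Pre_uniqueClicks; infer_instance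

def pvWitness_uniqueClicks : (List (String × List (String × String))) :=
  [("alice", [("u", "1"), ("v", "2"), ("u", "3")]), ("bob", [("u", "4")])]

def Spec_uniqueClicks (person_id_dict : List (String × List (String × String))) (out : List (String × Int)) : Prop := out = uniqueClicks_alt person_id_dict
instance (person_id_dict : List (String × List (String × String))) (out : List (String × Int)) : Decidable (Spec_uniqueClicks person_id_dict out) := by unfold Spec_uniqueClicks; infer_instance

-- ===== CLAIM (what is proved, stated in full; the proofs are below) =====
def Claim_equal_uniqueClicks : Prop := ∀ (person_id_dict : List (String × List (String × String))), Dom_uniqueClicks person_id_dict → Pre_uniqueClicks person_id_dict → Spec_uniqueClicks person_id_dict (uniqueClicks person_id_dict)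

-- ===== LEMMAS AND PROOFS =====

-- the keys of the two accumulators coincide
theorem pvKeysEq (urls : PySem.Dict String Int) (seen : PySem.Dict String (PySem.Set String))
    (h1 : urls.items = seen.items.map pvLenKV) : urls.keys = seen.keys := by
  simp only [PySem.Dict.keys, h1, List.map_map]
  rfl

theorem pvContainsEq (urls : PySem.Dict String Int) (seen : PySem.Dict String (PySem.Set String))
    (h1 : urls.items = seen.items.map pvLenKV) (k : String) :
    urls.contains k = seen.contains k := by
  rw [PySem.Dict.contains_eq_decide_mem_keys, PySem.Dict.contains_eq_decide_mem_keys,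
    pvKeysEq urls seen h1]

-- inserting the value a key already holds is a no-op
theorem pvInsertSelf {κ ν : Type} [BEq κ] [LawfulBEq κ] (d : PySem.Dict κ ν) (k : κ) (v : ν)
    (hnd : d.keys.Nodup) (h : d.get? k = some v) : d.insert k v = d := by
  apply PySem.Dict.ext
  have hc : d.contains k = true := by rw [PySem.Dict.contains_eq_isSome_get?, h]; rfl
  rw [PySem.Dict.items_insert_of_contains d v hc]
  conv_rhs => rw [← List.map_id d.items]
  apply List.map_congr_left
  intro q hq
  obtain ⟨q1, q2⟩ := q
  by_cases hk : q1 = k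
  · subst hk
    have hq2 : d.get? q1 = some q2 := PySem.Dict.get?_of_mem_items d hq hnd
    rw [h] at hq2
    injection hq2 with hv
    simp [hv]
  · simp [hk]

-- the entry a key holds is unique (Nodup keys)
theorem pvValUnique {ν : Type} (d : PySem.Dict String ν) (hnd : d.keys.Nodup)
    {u : String} {s : ν} (hs : d.get? u = some s)
    (kv : String × ν) (hkv : kv ∈ d.items) (hk : kv.1 = u) : kv.2 = s := by
  obtain ⟨k1, k2⟩ := kv
  simp only at hk
  subst hk
  have h2 := PySem.Dict.get?_of_mem_items d hkv hnd
  rw [hs] at h2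
  injection h2 with hv
  exact hv.symm

-- one event preserves the simulation invariant between A's and B's inner loops
theorem pvStepInv (p : String) (e : String × String)
    (already : PySem.Dict String Bool) (urls : PySem.Dict String Int)
    (seen : PySem.Dict String (PySem.Set String))
    (h1 : urls.items = seen.items.map pvLenKV)
    (h2 : seen.keys.Nodup)
    (h3 : ∀ kv ∈ seen.items, p ∈ kv.2 ↔ already.contains kv.1 = true)
    (h4 : ∀ k, already.contains k = true → k ∈ seen.keys) :
    (pvStepA (already, urls) e).2.items = (pvStepB p seen e).items.map pvLenKV ∧
    (pvStepB p seen e).keys.Nodup ∧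
    (∀ kv ∈ (pvStepB p seen e).items, p ∈ kv.2 ↔ (pvStepA (already, urls) e).1.contains kv.1 = true) ∧
    (∀ k, (pvStepA (already, urls) e).1.contains k = true → k ∈ (pvStepB p seen e).keys) := by
  by_cases hA : already.contains e.1 = true
  · -- repeated url within this person: both sides are no-ops on the accumulators
    have hkU : e.1 ∈ seen.keys := h4 e.1 hA
    have hcU : seen.contains e.1 = true := by
      rw [PySem.Dict.contains_eq_decide_mem_keys]; simpa using hkU
    have hsome : (seen.get? e.1).isSome := by
      rw [← PySem.Dict.contains_eq_isSome_get?]; exact hcU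
    obtain ⟨s, hs⟩ := Option.isSome_iff_exists.1 hsome
    have hmemS : (e.1, s) ∈ seen.items := PySem.Dict.mem_items_of_get?_eq_some seen hs
    have hps : p ∈ s := (h3 (e.1, s) hmemS).2 hA
    have hgd : seen.getD e.1 PySem.Set.empty = s := by simp [PySem.Dict.getD, hs]
    have hadd : PySem.Set.add s p = s := by simp [PySem.Set.add, hps]
    have hB : pvStepB p seen e = seen := by
      simp only [pvStepB, hgd, hadd]
      exact pvInsertSelf seen e.1 s h2 hs
    have hAstep : pvStepA (already, urls) e = (already.insert e.1 true, urls) := by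
      simp [pvStepA, hA]
    rw [hB, hAstep]
    refine ⟨h1, h2, ?_, ?_⟩
    · intro kv hkv
      rw [PySem.Dict.contains_insert]
      by_cases hk : kv.1 = e.1
      · have hkv2 : kv.2 = s := pvValUnique seen h2 hs kv hkv hk
        simp [hk, hkv2, hps]
      · simp [hk, h3 kv hkv]
    · intro k hk
      rw [PySem.Dict.contains_insert] at hk
      simp only [Bool.or_eq_true, beq_iff_eq] at hk
      rcases hk with hk | hk
      · subst hk; exact hkU
      · exact h4 k hk
  · -- first occurrence of this url for this person
    have hA' : already.contains e.1 = false := by simpa using hA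
    have hcEq := pvContainsEq urls seen h1 e.1
    have hndU : urls.keys.Nodup := by rw [pvKeysEq urls seen h1]; exact h2
    have hAstep : pvStepA (already, urls) e = (already.insert e.1 true,
        if urls.contains e.1 = false then urls.insert e.1 1 else urls.modify e.1 0 (· + 1)) := by
      simp [pvStepA, hA']
    by_cases hU : seen.contains e.1 = true
    · -- url already has an entry: A bumps the count, B grows the set by one
      have hsome : (seen.get? e.1).isSome := by
        rw [← PySem.Dict.contains_eq_isSome_get?]; exact hU
      obtain ⟨s, hs⟩ := Option.isSome_iff_exists.1 hsome
      have hmemS : (e.1, s) ∈ seen.items := PySem.Dict.mem_items_of_get?_eq_some seen hs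
      have hps : p ∉ s := by
        intro hp
        rw [(h3 (e.1, s) hmemS).1 hp] at hA'
        cases hA'
      have hgd : seen.getD e.1 PySem.Set.empty = s := by simp [PySem.Dict.getD, hs]
      have hadd : PySem.Set.add s p = s ++ [p] := by
        simp [PySem.Set.add, hps]
      have hB : pvStepB p seen e = seen.insert e.1 (s ++ [p]) := by
        simp only [pvStepB, hgd, hadd]
      have hu' : urls.contains e.1 = true := by rw [hcEq]; exact hU
      have hmemU : (e.1, PySem.Set.len s) ∈ urls.items := by
        rw [h1]; exact List.mem_map_of_mem hmemS
      have hgdU : urls.getD e.1 0 = PySem.Set.len s :=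
        PySem.Dict.getD_of_mem_items urls hmemU hndU 0
      have hAv : (pvStepA (already, urls) e).2 = urls.insert e.1 (PySem.Set.len s + 1) := by
        rw [hAstep]
        simp [hu', PySem.Dict.modify, hgdU]
      refine ⟨?_, ?_, ?_, ?_⟩
      · rw [hAv, hB, PySem.Dict.items_insert_of_contains urls _ hu',
          PySem.Dict.items_insert_of_contains seen _ hU, h1, List.map_map, List.map_map]
        apply List.map_congr_left
        intro kv hkv
        by_cases hk : kv.1 = e.1
        · have hkv2 : kv.2 = s := pvValUnique seen h2 hs kv hkv hk
          simp [Function.comp, pvLenKV, hk, hkv2, PySem.Set.len, List.length_append]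
        · simp [Function.comp, pvLenKV, hk]
      · rw [hB]; exact PySem.Dict.nodup_keys_insert seen e.1 (s ++ [p]) h2
      · intro kv hkv
        rw [hB] at hkv
        rw [hAstep]
        rw [PySem.Dict.contains_insert]
        rcases (PySem.Dict.mem_items_insert seen e.1 (s ++ [p]) kv).1 hkv with h' | ⟨h', hne⟩
        · subst h'; simp
        · have hbne : (kv.1 == e.1) = false := by simp [hne]
          rw [hbne, Bool.false_or]
          exact h3 kv h'
      · intro k hk
        rw [hAstep] at hk
        rw [PySem.Dict.contains_insert] at hk
        simp only [Bool.or_eq_true, beq_iff_eq] at hk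
        rw [hB]
        rcases hk with hk | hk
        · exact (PySem.Dict.mem_keys_insert seen e.1 k (s ++ [p])).2 (Or.inl hk)
        · exact (PySem.Dict.mem_keys_insert seen e.1 k (s ++ [p])).2 (Or.inr (h4 k hk))
    · -- brand-new url: both sides append an entry
      have hU' : seen.contains e.1 = false := by simpa using hU
      have hu' : urls.contains e.1 = false := by rw [hcEq]; exact hU'
      have hgd : seen.getD e.1 PySem.Set.empty = PySem.Set.empty :=
        PySem.Dict.getD_of_not_contains seen PySem.Set.empty hU'
      have hadd : PySem.Set.add PySem.Set.empty p = [p] := by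
        simp [PySem.Set.add, PySem.Set.empty]
      have hB : pvStepB p seen e = seen.insert e.1 [p] := by
        simp only [pvStepB, hgd, hadd]
      have hAv : (pvStepA (already, urls) e).2 = urls.insert e.1 1 := by
        rw [hAstep]; simp [hu']
      refine ⟨?_, ?_, ?_, ?_⟩
      · rw [hAv, hB, PySem.Dict.items_insert_of_not_contains urls 1 hu',
          PySem.Dict.items_insert_of_not_contains seen [p] hU', List.map_append, h1]
        simp [pvLenKV, PySem.Set.len]
      · rw [hB]; exact PySem.Dict.nodup_keys_insert seen e.1 [p] h2
      · intro kv hkv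
        rw [hB] at hkv
        rw [hAstep]
        rw [PySem.Dict.contains_insert]
        rcases (PySem.Dict.mem_items_insert seen e.1 [p] kv).1 hkv with h' | ⟨h', hne⟩
        · subst h'; simp
        · have hbne : (kv.1 == e.1) = false := by simp [hne]
          rw [hbne, Bool.false_or]
          exact h3 kv h'
      · intro k hk
        rw [hAstep] at hk
        rw [PySem.Dict.contains_insert] at hk
        simp only [Bool.or_eq_true, beq_iff_eq] at hk
        rw [hB]
        rcases hk with hk | hk
        · exact (PySem.Dict.mem_keys_insert seen e.1 k [p]).2 (Or.inl hk)
        · exact (PySem.Dict.mem_keys_insert seen e.1 k [p]).2 (Or.inr (h4 k hk))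

-- the inner loops run in lock-step
theorem pvInnerInv (p : String) (evs : List (String × String))
    (already : PySem.Dict String Bool) (urls : PySem.Dict String Int)
    (seen : PySem.Dict String (PySem.Set String))
    (h1 : urls.items = seen.items.map pvLenKV)
    (h2 : seen.keys.Nodup)
    (h3 : ∀ kv ∈ seen.items, p ∈ kv.2 ↔ already.contains kv.1 = true)
    (h4 : ∀ k, already.contains k = true → k ∈ seen.keys) :
    (evs.foldl pvStepA (already, urls)).2.items
      = (evs.foldl (pvStepB p) seen).items.map pvLenKV ∧
    (evs.foldl (pvStepB p) seen).keys.Nodup := by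
  induction evs generalizing already urls seen with
  | nil => exact ⟨h1, h2⟩
  | cons e t ih =>
    obtain ⟨g1, g2, g3, g4⟩ := pvStepInv p e already urls seen h1 h2 h3 h4
    simpa [List.foldl_cons] using
      ih (pvStepA (already, urls) e).1 (pvStepA (already, urls) e).2 (pvStepB p seen e)
        g1 g2 g3 g4

-- B's inner loop only ever adds the current person to a set
theorem pvMembersInv (p : String) (Q : String → Prop) (hQp : Q p)
    (evs : List (String × String)) (seen : PySem.Dict String (PySem.Set String))
    (h : ∀ kv ∈ seen.items, ∀ q ∈ kv.2, Q q) :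
    ∀ kv ∈ (evs.foldl (pvStepB p) seen).items, ∀ q ∈ kv.2, Q q := by
  induction evs generalizing seen with
  | nil => exact h
  | cons e t ih =>
    refine ih (pvStepB p seen e) ?_
    intro kv hkv q hq
    rcases (PySem.Dict.mem_items_insert seen e.1 _ kv).1 hkv with h' | h'
    · have hq' : q ∈ (seen.getD e.1 PySem.Set.empty) ++ [p] := by
        subst h'
        revert hq
        simp only [PySem.Set.add]
        split
        · intro hq; exact List.mem_append_left _ hq
        · exact id
      rcases List.mem_append.1 hq' with hq1 | hq1
      · rcases hget : seen.get? e.1 with _ | s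
        · simp only [PySem.Dict.getD, hget, Option.getD] at hq1
          simp [PySem.Set.empty] at hq1
        · simp only [PySem.Dict.getD, hget, Option.getD] at hq1
          exact h _ (PySem.Dict.mem_items_of_get?_eq_some seen hget) q hq1
      · simp only [List.mem_singleton] at hq1
        subst hq1
        exact hQp
    · exact h kv h'.1 q hq

-- the outer loops run in lock-step
theorem pvOuterInv (pd : List (String × List (String × String)))
    (urls : PySem.Dict String Int) (seen : PySem.Dict String (PySem.Set String))
    (done : List String)
    (h1 : urls.items = seen.items.map pvLenKV)
    (h2 : seen.keys.Nodup)
    (hdone : ∀ kv ∈ seen.items, ∀ q ∈ kv.2, q ∈ done)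
    (hdisj : ∀ x ∈ pd.map Prod.fst, x ∉ done)
    (hnd : (pd.map Prod.fst).Nodup) :
    (pd.foldl (fun urls pe => (pe.2.foldl pvStepA (PySem.Dict.empty, urls)).2) urls).items
      = (pd.foldl (fun seen pe => pe.2.foldl (pvStepB pe.1) seen) seen).items.map pvLenKV := by
  induction pd generalizing urls seen done with
  | nil => simpa using h1
  | cons pe rest ih =>
    simp only [List.map_cons, List.nodup_cons] at hnd
    have h3 : ∀ kv ∈ seen.items, pe.1 ∈ kv.2 ↔ (PySem.Dict.empty (κ := String) (ν := Bool)).contains kv.1 = true := by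
      intro kv hkv
      simp only [PySem.Dict.contains_empty]
      constructor
      · intro hp
        exact absurd (hdone kv hkv pe.1 hp) (hdisj pe.1 (by simp))
      · intro h; cases h
    have h4 : ∀ k, (PySem.Dict.empty (κ := String) (ν := Bool)).contains k = true → k ∈ seen.keys := by
      intro k hk; simp [PySem.Dict.contains_empty] at hk
    obtain ⟨g1, g2⟩ := pvInnerInv pe.1 pe.2 PySem.Dict.empty urls seen h1 h2 h3 h4
    have hmem : ∀ kv ∈ (pe.2.foldl (pvStepB pe.1) seen).items, ∀ q ∈ kv.2, q ∈ done ++ [pe.1] :=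
      pvMembersInv pe.1 (fun q => q ∈ done ++ [pe.1]) (by simp) pe.2 seen
        (fun kv hkv q hq => by simp [hdone kv hkv q hq])
    simp only [List.foldl_cons]
    refine ih _ _ (done ++ [pe.1]) g1 g2 hmem ?_ hnd.2
    intro x hx hmemx
    rcases List.mem_append.1 hmemx with hd | hd
    · exact hdisj x (by simp only [List.map_cons, List.mem_cons]; exact Or.inr hx) hd
    · simp only [List.mem_singleton] at hd
      subst hd
      exact hnd.1 hx

-- ===== VERDICT (by name: the statement is the Claim_ definition above) =====
theorem uniqueClicks_spec : Claim_equal_uniqueClicks := by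
  intro pd _ hpre
  unfold Spec_uniqueClicks uniqueClicks uniqueClicks_alt
  exact pvOuterInv pd PySem.Dict.empty PySem.Dict.empty [] rfl PySem.Dict.nodup_keys_empty
    (by intro kv hkv; simp [PySem.Dict.empty] at hkv)
    (by intro x hx; simp) hpre
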